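-- pv_equiv track=rewrite | github.com/DorianSchlede/nexus-template | 03-skills/create-skill-algorithm/scripts/migrate_flat_to_nested.py | categorize_skills
-- ===== SOURCE A (Python) =====
-- from typing import Dict, List, Any
--
-- def categorize_skills(skills: List[str], orchestrators: List[str], shared: List[str]) -> Dict[str, str]:
--     """Categorize skills into orchestrators, sub-skills, or shared."""
--     categories = {}
--
--     for skill in skills:
--         if skill in orchestrators:
--             categories[skill] = 'orchestrators'
--         elif skill in shared:
--             categories[skill] = 'shared'
--         else:
--             categories[skill] = 'skills'
--
--     return categories
-- ===== SOURCE B (Python) =====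
-- def categorize_skills(skills, orchestrators, shared):
--     """Categorize skills into orchestrators, sub-skills, or shared."""
--     orch = set(skills) & set(orchestrators)
--     sh = (set(skills) & set(shared)) - orch
--     categories = {s: 'skills' for s in skills}
--     for s in sh:
--         categories[s] = 'shared'
--     for s in orch:
--         categories[s] = 'orchestrators'
--     return categories
-- ===== Notes on version B (the rewrite author's own statement) =====
-- stated objective: faster
-- what changed: Replaces the per-skill priority branch (with linear list membership scans) by precomputed set intersections/differences plus a default dict comprehension and two override passes.
import Mathlib
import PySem

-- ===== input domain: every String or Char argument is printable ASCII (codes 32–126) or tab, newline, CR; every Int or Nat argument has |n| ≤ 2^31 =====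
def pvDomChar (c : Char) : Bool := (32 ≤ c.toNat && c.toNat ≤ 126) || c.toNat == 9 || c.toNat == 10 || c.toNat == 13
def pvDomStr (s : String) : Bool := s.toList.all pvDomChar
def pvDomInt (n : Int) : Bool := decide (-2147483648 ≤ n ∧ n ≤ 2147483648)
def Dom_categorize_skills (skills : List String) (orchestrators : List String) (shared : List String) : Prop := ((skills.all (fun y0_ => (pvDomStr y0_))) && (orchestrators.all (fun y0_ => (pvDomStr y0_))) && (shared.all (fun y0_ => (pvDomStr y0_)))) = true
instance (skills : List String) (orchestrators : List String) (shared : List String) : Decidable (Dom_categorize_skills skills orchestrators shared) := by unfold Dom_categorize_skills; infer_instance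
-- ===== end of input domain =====

-- ===== PORT A =====
-- B changes the decomposition: precomputed set intersections/differences plus a default pass and two
-- override passes, instead of A's per-skill membership branch; equivalence of the returned dict is proved.
-- Port of A: one fold over skills, branching on list membership, building the dict; returns its items.
def categorize_skills (skills : List String) (orchestrators : List String) (shared : List String) : List (String × String) :=
  (skills.foldl (fun categories skill =>
      if orchestrators.contains skill then categories.insert skill "orchestrators"
      else if shared.contains skill then categories.insert skill "shared"
      else categories.insert skill "skills")
    PySem.Dict.empty).items

-- ===== PORT B =====
-- Port of B: set algebra first, then a 'skills'-default dict, then two override passes.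
def categorize_skills_alt (skills : List String) (orchestrators : List String) (shared : List String) : List (String × String) :=
  let orch : PySem.Set String := PySem.Set.inter (PySem.Set.ofList skills) (PySem.Set.ofList orchestrators)
  let sh : PySem.Set String := PySem.Set.diff (PySem.Set.inter (PySem.Set.ofList skills) (PySem.Set.ofList shared)) orch
  let base := skills.foldl (fun d s => d.insert s "skills") PySem.Dict.empty
  let d1 := sh.foldl (fun d s => d.insert s "shared") base
  let d2 := orch.foldl (fun d s => d.insert s "orchestrators") d1
  d2.items

-- ===== PRECONDITION & SPEC =====
def Spec_categorize_skills (skills : List String) (orchestrators : List String) (shared : List String) (out : List (String × String)) : Prop := out = categorize_skills_alt skills orchestrators shared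
instance (skills : List String) (orchestrators : List String) (shared : List String) (out : List (String × String)) : Decidable (Spec_categorize_skills skills orchestrators shared out) := by unfold Spec_categorize_skills; infer_instance

-- ===== CLAIM (what is proved, stated in full; the proofs are below) =====
def Claim_equal_categorize_skills : Prop := ∀ (skills : List String) (orchestrators : List String) (shared : List String), Dom_categorize_skills skills orchestrators shared → Spec_categorize_skills skills orchestrators shared (categorize_skills skills orchestrators shared)

-- ===== LEMMAS AND PROOFS =====

-- Folding key-determined inserts (value v k for key k) over l, starting from a dict whose items are
-- S.map (k, v k): the items become (Set.update S l).map (k, v k).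
theorem items_foldl_insert_keyval {v : String → String} (l S : List String) :
    (l.foldl (fun d s => d.insert s (v s)) (PySem.Dict.mk (S.map (fun k => (k, v k))))).items
      = (PySem.Set.update S l).map (fun k => (k, v k)) := by
  induction l generalizing S with
  | nil => simp [PySem.Set.update]
  | cons a t ih =>
    simp only [List.foldl_cons]
    by_cases ha : a ∈ S
    · have hc : (PySem.Dict.mk (S.map (fun k => (k, v k)))).contains a = true := by
        rw [PySem.Dict.contains_iff_mem_keys]
        simp [PySem.Dict.keys]
        exact ha
      have hit := PySem.Dict.items_insert_of_contains (PySem.Dict.mk (S.map (fun k => (k, v k)))) (v a) hc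
      have hmap : List.map (fun p => if (p.1 == a) = true then (a, v a) else p)
          (PySem.Dict.mk (S.map (fun k => (k, v k)))).items = S.map (fun k => (k, v k)) := by
        simp only [List.map_map]
        apply List.map_congr_left
        intro k _
        by_cases hk : k = a <;> simp [hk]
      have : ((PySem.Dict.mk (S.map (fun k => (k, v k)))).insert a (v a))
          = PySem.Dict.mk (S.map (fun k => (k, v k))) := by
        apply PySem.Dict.ext
        rw [hit, hmap]
      rw [this, ih]
      simp [PySem.Set.update, PySem.Set.add_of_mem ha]
    · have hc : (PySem.Dict.mk (S.map (fun k => (k, v k)))).contains a = false := by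
        rw [← Bool.not_eq_true, PySem.Dict.contains_iff_mem_keys]
        simp [PySem.Dict.keys]
        exact ha
      have hit := PySem.Dict.items_insert_of_not_contains (PySem.Dict.mk (S.map (fun k => (k, v k)))) (v a) hc
      have : ((PySem.Dict.mk (S.map (fun k => (k, v k)))).insert a (v a))
          = PySem.Dict.mk ((S ++ [a]).map (fun k => (k, v k))) := by
        apply PySem.Dict.ext
        rw [hit]; simp
      rw [this, ih]
      simp [PySem.Set.update, PySem.Set.add_of_not_mem ha]

-- Overriding existing keys: folding inserts of value w over L ⊆ S, starting from items S.map (k, g k),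
-- updates exactly the entries whose key is in L.
theorem items_foldl_override (L S : List String) (w : String) (g : String → String)
    (hsub : ∀ x ∈ L, x ∈ S) :
    (L.foldl (fun d s => d.insert s w) (PySem.Dict.mk (S.map (fun k => (k, g k))))).items
      = S.map (fun k => (k, if k ∈ L then w else g k)) := by
  induction L generalizing g with
  | nil => simp
  | cons a t ih =>
    simp only [List.foldl_cons]
    have haS : a ∈ S := hsub a (List.mem_cons_self ..)
    have hc : (PySem.Dict.mk (S.map (fun k => (k, g k)))).contains a = true := by
      rw [PySem.Dict.contains_iff_mem_keys]
      simp [PySem.Dict.keys]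
      exact haS
    have hit := PySem.Dict.items_insert_of_contains (PySem.Dict.mk (S.map (fun k => (k, g k)))) w hc
    have hstep : ((PySem.Dict.mk (S.map (fun k => (k, g k)))).insert a w)
        = PySem.Dict.mk (S.map (fun k => (k, if k = a then w else g k))) := by
      apply PySem.Dict.ext
      rw [hit]
      simp only [List.map_map]
      apply List.map_congr_left
      intro k _
      by_cases hk : k = a <;> simp [hk]
    rw [hstep, ih _ (fun x hx => hsub x (List.mem_cons_of_mem _ hx))]
    apply List.map_congr_left
    intro k _
    by_cases hkt : k ∈ t
    · simp [hkt]
    · by_cases hka : k = a <;> simp [hka, hkt]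

theorem categorize_skills_eq (skills orchestrators shared : List String) :
    categorize_skills skills orchestrators shared = categorize_skills_alt skills orchestrators shared := by
  unfold categorize_skills categorize_skills_alt
  -- name the pieces
  set v : String → String := fun s =>
    if orchestrators.contains s then "orchestrators"
    else if shared.contains s then "shared" else "skills" with hv
  set orch : PySem.Set String :=
    PySem.Set.inter (PySem.Set.ofList skills) (PySem.Set.ofList orchestrators) with horch
  set sh : PySem.Set String :=
    PySem.Set.diff (PySem.Set.inter (PySem.Set.ofList skills) (PySem.Set.ofList shared)) orch with hsh
  -- A's branch is a key-determined insert
  have hA : (skills.foldl (fun categories skill =>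
      if orchestrators.contains skill then categories.insert skill "orchestrators"
      else if shared.contains skill then categories.insert skill "shared"
      else categories.insert skill "skills") PySem.Dict.empty)
      = skills.foldl (fun d s => d.insert s (v s)) PySem.Dict.empty := by
    apply PySem.List.foldl_congr_mem
    intro d s _
    by_cases h1 : s ∈ orchestrators <;> by_cases h2 : s ∈ shared <;> simp [hv, h1, h2]
  rw [hA]
  -- A's items
  have hAitems : (skills.foldl (fun d s => d.insert s (v s))
      (PySem.Dict.empty : PySem.Dict String String)).items
      = (PySem.Set.ofList skills).map (fun k => (k, v k)) :=
    items_foldl_insert_keyval skills []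
  -- B's base
  have hbase : (skills.foldl (fun d s => d.insert s "skills")
      (PySem.Dict.empty : PySem.Dict String String))
      = PySem.Dict.mk ((PySem.Set.ofList skills).map (fun k => (k, "skills"))) := by
    apply PySem.Dict.ext
    exact items_foldl_insert_keyval (v := fun _ => "skills") skills []
  -- shared override pass
  have hsub_sh : ∀ x ∈ sh, x ∈ PySem.Set.ofList skills := by
    intro x hx
    have := (PySem.Set.mem_diff _ _ _).mp hx
    exact ((PySem.Set.mem_inter _ _ _).mp this.1).1
  have hsub_orch : ∀ x ∈ orch, x ∈ PySem.Set.ofList skills := by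
    intro x hx
    exact ((PySem.Set.mem_inter _ _ _).mp hx).1
  have hd1 : (sh.foldl (fun d s => d.insert s "shared")
      (skills.foldl (fun d s => d.insert s "skills") (PySem.Dict.empty : PySem.Dict String String)))
      = PySem.Dict.mk ((PySem.Set.ofList skills).map
          (fun k => (k, if k ∈ sh then "shared" else "skills"))) := by
    rw [hbase]
    apply PySem.Dict.ext
    exact items_foldl_override sh (PySem.Set.ofList skills) "shared" (fun _ => "skills") hsub_sh
  have hd2 : (orch.foldl (fun d s => d.insert s "orchestrators")
      (sh.foldl (fun d s => d.insert s "shared")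
        (skills.foldl (fun d s => d.insert s "skills") (PySem.Dict.empty : PySem.Dict String String)))).items
      = (PySem.Set.ofList skills).map
          (fun k => (k, if k ∈ orch then "orchestrators"
                        else if k ∈ sh then "shared" else "skills")) := by
    rw [hd1]
    exact items_foldl_override orch (PySem.Set.ofList skills) "orchestrators"
      (fun k => if k ∈ sh then "shared" else "skills") hsub_orch
  rw [hAitems, hd2]
  apply List.map_congr_left
  intro k hk
  have hks : k ∈ skills := (PySem.Set.mem_ofList _ _).mp hk
  have ho : k ∈ orch ↔ k ∈ orchestrators := by
    rw [horch, PySem.Set.mem_inter]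
    simp [hk, PySem.Set.mem_ofList]
  have hs : k ∈ sh ↔ (k ∈ shared ∧ k ∉ orchestrators) := by
    rw [hsh, PySem.Set.mem_diff, PySem.Set.mem_inter]
    simp [hk, PySem.Set.mem_ofList, ho]
  by_cases h1 : k ∈ orchestrators <;> by_cases h2 : k ∈ shared <;>
    simp [hv, ho, hs, h1, h2]

-- ===== VERDICT (by name: the statement is the Claim_ definition above) =====
theorem categorize_skills_spec : Claim_equal_categorize_skills := by
  intro skills orchestrators shared _
  exact categorize_skills_eq skills orchestrators shared
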